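-- pv_equiv track=rewrite | github.com/robnoflop/Schatsi | src/SCHATSI004.py | term_filtering
-- ===== SOURCE A (Python) =====
-- def term_filtering(term_list, stopwords):
--     # remove duplicates and filter for unuseful words
--     term_list_filtered = []
--     term_count_filtered = []
--
--     # if element is not already in list and is not a stopword -> write the term into a filtered list
--     for element in term_list:
--         if element not in term_list_filtered and element not in stopwords:
--             term_list_filtered.append(element)
--     # every time a term in the list is found increase the counter +1, in the end the total number is found
--     for element in term_list_filtered:
--         counter = 0
--         for term in term_list:
--             if element == term:
--                 counter = counter + 1
--         term_count_filtered.append(counter)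
--
--     # returning the list with the filtered single-word expressions and a list with the total number of each word
--     return term_list_filtered, term_count_filtered
-- ===== SOURCE B (Python) =====
-- def term_filtering(term_list, stopwords):
--     # one fused pass: insertion-ordered dict term -> occurrence count
--     counts = {}
--     for element in term_list:
--         if element not in stopwords:
--             counts[element] = counts.get(element, 0) + 1
--     return list(counts.keys()), list(counts.values())
-- ===== Notes on version B (the rewrite author's own statement) =====
-- stated objective: faster
-- what changed: Replaces A's dedup-list pass plus a nested full re-scan per unique term with one fused pass maintaining an insertion-ordered dict from term to count.
import Mathlib
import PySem

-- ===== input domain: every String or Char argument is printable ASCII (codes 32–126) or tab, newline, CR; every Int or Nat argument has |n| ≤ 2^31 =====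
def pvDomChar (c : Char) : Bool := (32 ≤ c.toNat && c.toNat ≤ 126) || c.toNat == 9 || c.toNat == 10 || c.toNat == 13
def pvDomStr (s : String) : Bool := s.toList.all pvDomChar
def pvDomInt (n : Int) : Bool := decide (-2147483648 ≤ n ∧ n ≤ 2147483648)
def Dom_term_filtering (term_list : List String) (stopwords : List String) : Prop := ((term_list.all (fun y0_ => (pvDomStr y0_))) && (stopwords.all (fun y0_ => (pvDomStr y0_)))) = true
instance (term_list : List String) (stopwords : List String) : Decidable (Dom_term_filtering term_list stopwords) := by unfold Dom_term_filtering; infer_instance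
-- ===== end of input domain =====

-- B fuses A's dedup pass and nested counting re-scan into one pass over term_list
-- maintaining an insertion-ordered dict term -> count (objective: faster).


-- ===== PORT A =====
def term_filtering (term_list : List String) (stopwords : List String) : List String × List Int :=
  let term_list_filtered : List String :=
    term_list.foldl
      (fun acc element =>
        if !(acc.contains element) && !(stopwords.contains element) then acc ++ [element]
        else acc)
      []
  let term_count_filtered : List Int :=
    term_list_filtered.foldl
      (fun acc element =>
        acc ++ [term_list.foldl
                  (fun counter term => if element == term then counter + 1 else counter)
                  (0 : Int)])
      []
  (term_list_filtered, term_count_filtered)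

-- ===== PORT B =====
def term_filtering_alt (term_list : List String) (stopwords : List String) : List String × List Int :=
  let counts : PySem.Dict String Int :=
    term_list.foldl
      (fun d element =>
        if !(stopwords.contains element) then d.insert element (d.getD element 0 + 1)
        else d)
      PySem.Dict.empty
  (counts.keys, counts.values)

-- ===== PRECONDITION & SPEC =====
def Spec_term_filtering (term_list : List String) (stopwords : List String) (out : List String × List Int) : Prop := out = term_filtering_alt term_list stopwords
instance (term_list : List String) (stopwords : List String) (out : List String × List Int) : Decidable (Spec_term_filtering term_list stopwords out) := by unfold Spec_term_filtering; infer_instance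

-- ===== CLAIM (what is proved, stated in full; the proofs are below) =====
def Claim_equal_term_filtering : Prop := ∀ (term_list : List String) (stopwords : List String), Dom_term_filtering term_list stopwords → Spec_term_filtering term_list stopwords (term_filtering term_list stopwords)

-- ===== LEMMAS AND PROOFS =====

-- A's first loop builds exactly set(filter(non-stopword, term_list)) in first-occurrence order.
theorem tf_filtered_eq (term_list stopwords : List String) :
    term_list.foldl
      (fun acc element =>
        if !(acc.contains element) && !(stopwords.contains element) then acc ++ [element]
        else acc) [] =
    PySem.Set.ofList (term_list.filter (fun e => !(stopwords.contains e))) := by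
  have hstep : ∀ (acc : List String) (e : String),
      (if !(acc.contains e) && !(stopwords.contains e) then acc ++ [e] else acc) =
      (if (!(stopwords.contains e) : Bool) = true then PySem.Set.add acc e else acc) := by
    intro acc e
    by_cases hs : e ∈ stopwords
    · simp [hs]
    · by_cases ha : e ∈ acc
      · simp [hs, ha]
      · simp [hs, ha]
  calc term_list.foldl
        (fun acc element =>
          if !(acc.contains element) && !(stopwords.contains element) then acc ++ [element]
          else acc) []
      = term_list.foldl
          (fun acc e => if (!(stopwords.contains e) : Bool) = true then PySem.Set.add acc e else acc) [] := by
        exact PySem.List.foldl_congr_mem _ _ _ _ (fun acc x _ => hstep acc x)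
    _ = (term_list.filter (fun e => !(stopwords.contains e))).foldl PySem.Set.add [] := by
        simpa using PySem.List.foldl_if_eq_foldl_filter (fun e => !(stopwords.contains e)) PySem.Set.add (l := term_list) (init := [])
    _ = PySem.Set.ofList (term_list.filter (fun e => !(stopwords.contains e))) := by
        rw [PySem.Set.ofList_eq_foldl]

-- B's loop is the counter of the non-stopword subsequence.
theorem tf_counts_eq (term_list stopwords : List String) :
    term_list.foldl
      (fun d element =>
        if !(stopwords.contains element) then d.insert element (d.getD element 0 + 1)
        else d) PySem.Dict.empty =
    PySem.Dict.counter (term_list.filter (fun e => !(stopwords.contains e))) := by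
  rw [PySem.List.foldl_if_eq_foldl_filter (fun e => !(stopwords.contains e))
        (fun d e => PySem.Dict.insert d e (d.getD e 0 + 1)) (l := term_list) (init := PySem.Dict.empty)]
  exact PySem.Dict.foldl_insert_getD_add_one_eq_counter _

theorem tf_count_filter (tl sw : List String) (k : String) (hk : k ∉ sw) :
    (tl.filter (fun e => !(sw.contains e))).count k = tl.count k := by
  rw [List.count_filter]
  simp [hk]

theorem term_filtering_spec : Claim_equal_term_filtering := by
  intro term_list stopwords _
  unfold Spec_term_filtering term_filtering term_filtering_alt
  simp only
  rw [tf_filtered_eq, tf_counts_eq]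
  refine Prod.ext ?_ ?_
  · simp [PySem.Dict.keys_counter]
  · simp only
    rw [PySem.Dict.values_eq_map_keys _ (PySem.Dict.nodup_keys_counter _) 0,
        PySem.Dict.keys_counter]
    rw [PySem.List.foldl_append_singleton_eq_map]
    simp only [List.nil_append]
    apply List.map_congr_left
    intro k hk
    have hkF : k ∈ term_list.filter (fun e => !(stopwords.contains e)) := by
      simpa using (PySem.Set.mem_ofList _ _).1 hk
    have hknsw : k ∉ stopwords := by
      have := List.of_mem_filter hkF
      simpa using this
    rw [PySem.Dict.getD_counter, tf_count_filter _ _ _ hknsw]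
    have hinner : term_list.foldl (fun counter term => if k == term then counter + 1 else counter) (0 : Int)
        = term_list.foldl (fun counter term => if term == k then counter + 1 else counter) (0 : Int) := by
      apply PySem.List.foldl_congr_mem
      intro acc x _
      rw [show (k == x) = (x == k) by simp [eq_comm]]
    rw [hinner, PySem.List.foldl_beq_add_one]
    simp
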